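-- pv_equiv track=rewrite | github.com/nirmesh/document-toolbox | mcp_word.py | _find_top_level_json_blocks
-- ===== SOURCE A (Python) =====
-- from typing import Dict, Any, List, Optional, Tuple
--
-- def _find_top_level_json_blocks(s: str) -> List[Tuple[int, int]]:
--     starts, blocks, stack = [], [], []
--     for i, ch in enumerate(s):
--         if ch in "{[":
--             stack.append((ch, i))
--         elif ch in "}]":
--             if not stack:
--                 continue
--             opening, start_idx = stack.pop()
--             if (opening == "{" and ch == "}") or (opening == "[" and ch == "]"):
--                 if not stack:
--                     blocks.append((start_idx, i + 1))
--     return blocks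
-- ===== SOURCE B (Python) =====
-- def _find_top_level_json_blocks(s):
--     blocks = []
--     depth = 0
--     start = 0
--     open_ch = ''
--     for i, ch in enumerate(s):
--         if ch in "{[":
--             if depth == 0:
--                 start = i
--                 open_ch = ch
--             depth += 1
--         elif ch in "}]":
--             if depth == 0:
--                 continue
--             depth -= 1
--             if depth == 0 and ((open_ch == "{" and ch == "}") or (open_ch == "[" and ch == "]")):
--                 blocks.append((start, i + 1))
--     return blocks
-- ===== Notes on version B (the rewrite author's own statement) =====
-- stated objective: simpler
-- what changed: B drops A's explicit stack of (char,index) pairs and keeps only an integer depth counter plus the top-level opener's char and index, appending a span when depth returns to 0 and the recorded opener matches the closer.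
import Mathlib
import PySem

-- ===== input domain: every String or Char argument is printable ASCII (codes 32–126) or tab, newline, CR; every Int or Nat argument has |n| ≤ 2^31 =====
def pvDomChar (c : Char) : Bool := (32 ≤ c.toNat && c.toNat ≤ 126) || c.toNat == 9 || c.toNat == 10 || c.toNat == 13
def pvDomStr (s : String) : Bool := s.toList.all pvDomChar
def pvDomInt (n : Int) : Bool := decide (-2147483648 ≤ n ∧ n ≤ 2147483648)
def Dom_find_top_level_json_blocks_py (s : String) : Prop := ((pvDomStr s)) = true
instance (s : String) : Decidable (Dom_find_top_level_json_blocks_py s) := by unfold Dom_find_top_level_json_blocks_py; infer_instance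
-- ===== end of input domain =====

-- B replaces A's explicit stack of (char,index) pairs by O(1) state: an integer depth
-- counter plus the top-level opener's char and index (objective: simpler state, same spans).

-- ===== PORT A =====
-- A's local 'starts' list is created and never used; it is omitted (it cannot affect the result).
def stepA (st : List (Int × Int) × List (Char × Int)) (p : Int × Char) :
    List (Int × Int) × List (Char × Int) :=
  if p.2 = '{' ∨ p.2 = '[' then
    (st.1, (p.2, p.1) :: st.2)
  else if p.2 = '}' ∨ p.2 = ']' then
    match st.2 with
    | [] => st          -- 'if not stack: continue'
    | (opening, start_idx) :: rest =>
      if ((opening = '{' ∧ p.2 = '}') ∨ (opening = '[' ∧ p.2 = ']')) ∧ rest = [] then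
        (st.1 ++ [(start_idx, p.1 + 1)], rest)
      else (st.1, rest)
  else st

def find_top_level_json_blocks_py (s : String) : List (Int × Int) :=
  (List.foldl stepA ([], []) (PySem.List.enumerate s.toList)).1

-- ===== PORT B =====
-- state: (blocks, depth, start, open_ch); Python's initial open_ch = '' is the unused-at-depth-0 ' '
def stepB (st : List (Int × Int) × Int × Int × Char) (p : Int × Char) :
    List (Int × Int) × Int × Int × Char :=
  let (blocks, depth, start, openc) := st
  if p.2 = '{' ∨ p.2 = '[' then
    if depth = 0 then (blocks, depth + 1, p.1, p.2)
    else (blocks, depth + 1, start, openc)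
  else if p.2 = '}' ∨ p.2 = ']' then
    if depth = 0 then st   -- 'continue'
    else if depth - 1 = 0 ∧ ((openc = '{' ∧ p.2 = '}') ∨ (openc = '[' ∧ p.2 = ']')) then
      (blocks ++ [(start, p.1 + 1)], depth - 1, start, openc)
    else (blocks, depth - 1, start, openc)
  else st

def find_top_level_json_blocks_py_alt (s : String) : List (Int × Int) :=
  (List.foldl stepB ([], 0, 0, ' ') (PySem.List.enumerate s.toList)).1

-- ===== PRECONDITION & SPEC =====
def Spec_find_top_level_json_blocks_py (s : String) (out : List (Int × Int)) : Prop := out = find_top_level_json_blocks_py_alt s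
instance (s : String) (out : List (Int × Int)) : Decidable (Spec_find_top_level_json_blocks_py s out) := by unfold Spec_find_top_level_json_blocks_py; infer_instance

-- ===== CLAIM (what is proved, stated in full; the proofs are below) =====
def Claim_equal_find_top_level_json_blocks_py : Prop := ∀ (s : String), Dom_find_top_level_json_blocks_py s → Spec_find_top_level_json_blocks_py s (find_top_level_json_blocks_py s)

-- ===== LEMMAS AND PROOFS =====

-- Invariant: B's depth is A's stack height, and at nonempty stack B's (open_ch, start)
-- is the bottom (first-pushed, i.e. top-level) element of A's stack.
lemma loop_eq (ps : List (Int × Char)) :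
    ∀ (blocks : List (Int × Int)) (stack : List (Char × Int)) (start : Int) (openc : Char),
      (stack = [] ∨ stack.getLast? = some (openc, start)) →
      (List.foldl stepA (blocks, stack) ps).1
        = (List.foldl stepB (blocks, (stack.length : Int), start, openc) ps).1 := by
  induction ps with
  | nil => intro blocks stack start openc _; rfl
  | cons p ps ih =>
    intro blocks stack start openc hinv
    simp only [List.foldl_cons]
    by_cases hop : p.2 = '{' ∨ p.2 = '['
    · cases stack with
      | nil =>
        simp only [stepA, stepB, hop, if_pos, List.length_nil, Nat.cast_zero]
        have := ih blocks [(p.2, p.1)] p.1 p.2 (Or.inr rfl)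
        simpa using this
      | cons top rest =>
        have hne : ((top :: rest).length : Int) ≠ 0 := by simp only [List.length_cons]; push_cast; omega
        simp only [stepA, stepB, hop, if_pos, hne, if_false]
        have hlast : (((p.2, p.1) :: top :: rest).getLast? = some (openc, start)) := by
          rw [List.getLast?_cons_cons]
          rcases hinv with h | h
          · exact absurd h (by simp)
          · exact h
        have := ih blocks ((p.2, p.1) :: top :: rest) start openc (Or.inr hlast)
        simp only [List.length_cons] at this ⊢
        push_cast at this ⊢
        convert this using 3
    · by_cases hcl : p.2 = '}' ∨ p.2 = ']'
      · cases stack with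
        | nil =>
          simp only [stepA, stepB, hop, hcl, if_pos, List.length_nil,
            Nat.cast_zero]
          exact ih blocks [] start openc (Or.inl rfl)
        | cons top rest =>
          have hne : ((top :: rest).length : Int) ≠ 0 := by simp only [List.length_cons]; push_cast; omega
          cases rest with
          | nil =>
            have htop : top = (openc, start) := by
              rcases hinv with h | h
              · exact absurd h (by simp)
              · simpa using h
            subst htop
            have h10 : ((([(openc, start)] : List (Char × Int)).length : Int)) - 1 = 0 := by simp
            by_cases hm : (openc = '{' ∧ p.2 = '}') ∨ (openc = '[' ∧ p.2 = ']')
            · simp only [stepA, stepB, hop, hcl, if_neg, if_pos, hne, h10, hm, and_true,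
                true_and, if_false]
              have := ih (blocks ++ [(start, p.1 + 1)]) [] start openc (Or.inl rfl)
              simpa using this
            · simp only [stepA, stepB, hop, hcl, if_neg, if_pos, hne, h10, hm, and_true,
                true_and, if_false, and_false]
              have := ih blocks [] start openc (Or.inl rfl)
              simpa using this
          | cons r rs =>
            have hlast : ((r :: rs).getLast? = some (openc, start)) := by
              rcases hinv with h | h
              · exact absurd h (by simp)
              · rw [List.getLast?_cons_cons] at h; exact h
            have hcondA : ¬ (((top.1 = '{' ∧ p.2 = '}') ∨ (top.1 = '[' ∧ p.2 = ']')) ∧ (r :: rs) = ([] : List (Char × Int))) := by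
              simp
            have hd1 : ((top :: r :: rs).length : Int) - 1 ≠ 0 := by
              simp only [List.length_cons]; push_cast; omega
            have hdne : ((top :: r :: rs).length : Int) ≠ 0 := by simp only [List.length_cons]; push_cast; omega
            simp only [stepA, stepB, hop, hcl, if_pos, hdne, hd1, hcondA,
              false_and, if_false]
            have := ih blocks (r :: rs) start openc (Or.inr hlast)
            have hlen : ((top :: r :: rs).length : Int) - 1 = ((r :: rs).length : Int) := by
              simp only [List.length_cons]; push_cast; ring
            rw [hlen]
            exact this
      · simp only [stepA, stepB, hop, hcl, if_false]
        exact ih blocks stack start openc hinv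

-- ===== VERDICT (by name: the statement is the Claim_ definition above) =====
theorem find_top_level_json_blocks_py_spec : Claim_equal_find_top_level_json_blocks_py := by
  intro s _
  unfold Spec_find_top_level_json_blocks_py find_top_level_json_blocks_py find_top_level_json_blocks_py_alt
  have := loop_eq (PySem.List.enumerate s.toList) [] [] 0 ' ' (Or.inl rfl)
  simpa using this
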